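-- pv_equiv track=rewrite | github.com/Root007x/python | priority_preemtive.py | find_next_process
-- ===== SOURCE A (Python) =====
-- def find_next_process(processes, n, completed, current_time):
--     max_priority = float('inf')
--     min_bt = float('inf')
--     min_arrival = float('inf')
--     min_idx = -1
--     for i in range(n):
--         if not completed[i] and processes[i][1] <= current_time:
--             if processes[i][3] < max_priority:
--                 max_priority = processes[i][3]
--                 min_bt = processes[i][2]
--                 min_arrival = processes[i][1]
--                 min_idx = i
--             elif processes[i][3] == max_priority and processes[i][1] < min_arrival:
--                 min_arrival = processes[i][1]
--                 min_bt = processes[i][2]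
--                 min_idx = i
--
--     return min_idx
-- ===== SOURCE B (Python) =====
-- def find_next_process(processes, n, completed, current_time):
--     candidates = [i for i in range(n)
--                   if not completed[i] and processes[i][1] <= current_time]
--     candidates.sort(key=lambda i: (processes[i][3], processes[i][1]))
--     return candidates[0] if candidates else -1
-- ===== Notes on version B (the rewrite author's own statement) =====
-- stated objective: idiomatic
-- what changed: Replaces the streaming argmin with manual tie-break bookkeeping by collect-eligible-indices + stable sort on the (priority, arrival) key, returning the first sorted candidate; stability reproduces A's lowest-index tie-break.
import Mathlib
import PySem

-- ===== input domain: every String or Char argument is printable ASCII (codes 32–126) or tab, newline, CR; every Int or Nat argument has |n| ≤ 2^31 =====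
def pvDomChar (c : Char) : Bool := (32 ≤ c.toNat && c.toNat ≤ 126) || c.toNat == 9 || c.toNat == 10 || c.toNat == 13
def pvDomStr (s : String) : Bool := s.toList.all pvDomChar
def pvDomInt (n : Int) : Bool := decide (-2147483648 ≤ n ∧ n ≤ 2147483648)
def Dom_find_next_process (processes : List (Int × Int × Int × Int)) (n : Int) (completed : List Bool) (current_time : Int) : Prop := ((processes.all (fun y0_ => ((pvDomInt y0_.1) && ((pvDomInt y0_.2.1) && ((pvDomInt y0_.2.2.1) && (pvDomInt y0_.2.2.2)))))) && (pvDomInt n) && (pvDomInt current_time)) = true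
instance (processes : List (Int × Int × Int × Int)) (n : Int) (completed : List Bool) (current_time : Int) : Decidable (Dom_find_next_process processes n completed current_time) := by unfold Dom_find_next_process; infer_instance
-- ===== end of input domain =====

-- B replaces A's streaming argmin (manual priority/arrival tie-break bookkeeping) with
-- collect-eligible-indices + stable sort on the (priority, arrival) key; same return value.

-- ===== PORT A =====
-- A's max_priority / min_arrival start at float('inf'); the port stores them as Option Int,
-- none = inf: 'x < inf' is true, 'x == inf' is false for any int x — exact for int inputs.
def pyLtInf (x : Int) (m : Option Int) : Bool :=
  match m with
  | none => true
  | some v => decide (x < v)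

def pyEqInf (x : Int) (m : Option Int) : Bool :=
  match m with
  | none => false
  | some v => decide (x = v)

def find_next_process (processes : List (Int × Int × Int × Int)) (n : Int) (completed : List Bool) (current_time : Int) : Int :=
  -- state = (max_priority, min_bt, min_arrival, min_idx)
  let st := (PySem.List.pyRange 0 n 1).foldl
    (fun (st : Option Int × Option Int × Option Int × Int) i =>
      if !(PySem.List.pyGetD completed i true) &&
         decide ((PySem.List.pyGetD processes i (0, 0, 0, 0)).2.1 ≤ current_time) then
        if pyLtInf (PySem.List.pyGetD processes i (0, 0, 0, 0)).2.2.2 st.1 then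
          (some (PySem.List.pyGetD processes i (0, 0, 0, 0)).2.2.2,
           some (PySem.List.pyGetD processes i (0, 0, 0, 0)).2.2.1,
           some (PySem.List.pyGetD processes i (0, 0, 0, 0)).2.1, i)
        else if pyEqInf (PySem.List.pyGetD processes i (0, 0, 0, 0)).2.2.2 st.1 &&
                pyLtInf (PySem.List.pyGetD processes i (0, 0, 0, 0)).2.1 st.2.2.1 then
          (st.1,
           some (PySem.List.pyGetD processes i (0, 0, 0, 0)).2.2.1,
           some (PySem.List.pyGetD processes i (0, 0, 0, 0)).2.1, i)
        else st
      else st)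
    (none, none, none, -1)
  st.2.2.2

-- ===== PORT B =====
def find_next_process_alt (processes : List (Int × Int × Int × Int)) (n : Int) (completed : List Bool) (current_time : Int) : Int :=
  let candidates := (PySem.List.pyRange 0 n 1).filter
    (fun i => !(PySem.List.pyGetD completed i true) &&
              decide ((PySem.List.pyGetD processes i (0, 0, 0, 0)).2.1 ≤ current_time))
  let sortedc := PySem.List.sorted2 candidates
    (fun i => (PySem.List.pyGetD processes i (0, 0, 0, 0)).2.2.2)
    (fun i => (PySem.List.pyGetD processes i (0, 0, 0, 0)).2.1)
  match sortedc with
  | [] => -1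
  | m :: _ => m

-- ===== PRECONDITION & SPEC =====
-- Pre_: exactly the inputs where Python A raises no IndexError: every loop index is inside
-- completed, and inside processes whenever completed[i] is False (short-circuit 'and').
def Pre_find_next_process (processes : List (Int × Int × Int × Int)) (n : Int) (completed : List Bool) (current_time : Int) : Prop :=
  n.toNat ≤ completed.length ∧
    ∀ i ∈ List.range n.toNat, (completed.getD i true = false → i < processes.length)
instance (processes : List (Int × Int × Int × Int)) (n : Int) (completed : List Bool) (current_time : Int) : Decidable (Pre_find_next_process processes n completed current_time) := by unfold Pre_find_next_process; infer_instance

def pvWitness_find_next_process : (List (Int × Int × Int × Int)) × Int × List Bool × Int :=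
  ([(1, 0, 3, 2), (2, 1, 2, 1)], 2, [false, false], 5)

def Spec_find_next_process (processes : List (Int × Int × Int × Int)) (n : Int) (completed : List Bool) (current_time : Int) (out : Int) : Prop := out = find_next_process_alt processes n completed current_time
instance (processes : List (Int × Int × Int × Int)) (n : Int) (completed : List Bool) (current_time : Int) (out : Int) : Decidable (Spec_find_next_process processes n completed current_time out) := by unfold Spec_find_next_process; infer_instance

-- ===== CLAIM (what is proved, stated in full; the proofs are below) =====
def Claim_equal_find_next_process : Prop := ∀ (processes : List (Int × Int × Int × Int)) (n : Int) (completed : List Bool) (current_time : Int), Dom_find_next_process processes n completed current_time → Pre_find_next_process processes n completed current_time → Spec_find_next_process processes n completed current_time (find_next_process processes n completed current_time)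

-- ===== LEMMAS AND PROOFS =====

-- head-step behaviour of PySem's insertion sort
theorem insertBy_cons {α : Type} (before : α → α → Bool) (x h : α) (t : List α) :
    PySem.List.insertBy before x (h :: t) =
      if before x h then x :: h :: t else h :: PySem.List.insertBy before x t := by
  simp [PySem.List.insertBy]

theorem insertBy_nil {α : Type} (before : α → α → Bool) (x : α) :
    PySem.List.insertBy before x [] = [x] := by
  simp [PySem.List.insertBy]

-- The loop invariant: A's state mirrors the head of the stable-sorted candidate list.
-- pri/arr/bt abstract processes[i][3], processes[i][1], processes[i][2]; pred the eligibility test.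
theorem fold_inv (pri arr bt : Int → Int) (pred : Int → Bool) (L s : List Int)
    (st : Option Int × Option Int × Option Int × Int)
    (hrel : (s = [] ∧ st = (none, none, none, -1)) ∨
            (∃ m t, s = m :: t ∧ st = (some (pri m), some (bt m), some (arr m), m))) :
    (let step := fun (st : Option Int × Option Int × Option Int × Int) i =>
        if pred i then
          if pyLtInf (pri i) st.1 then (some (pri i), some (bt i), some (arr i), i)
          else if pyEqInf (pri i) st.1 && pyLtInf (arr i) st.2.2.1 then
            (st.1, some (bt i), some (arr i), i)
          else st
        else st
     let lt := fun a b => decide (pri a < pri b) || (!decide (pri b < pri a) && decide (arr a < arr b))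
     let s' := (L.filter pred).foldl (fun acc x => PySem.List.insertBy lt x acc) s
     let st' := L.foldl step st
     (s' = [] ∧ st' = (none, none, none, -1)) ∨
     (∃ m t, s' = m :: t ∧ st' = (some (pri m), some (bt m), some (arr m), m))) := by
  induction L generalizing s st with
  | nil => exact hrel
  | cons i L ih =>
    simp only [List.filter_cons, List.foldl_cons]
    by_cases hp : pred i
    · simp only [hp, if_pos, List.foldl_cons]
      apply ih
      rcases hrel with ⟨hs, hst⟩ | ⟨m, t, hs, hst⟩
      · subst hs; subst hst
        right
        refine ⟨i, [], by simp [insertBy_nil], by simp [pyLtInf]⟩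
      · subst hs; subst hst
        rw [insertBy_cons]
        by_cases h1 : pri i < pri m
        · right
          refine ⟨i, m :: t, by simp [h1], by simp [pyLtInf, h1]⟩
        · by_cases h2 : pri m < pri i
          · right
            have hne : ¬ pri i = pri m := by omega
            refine ⟨m, PySem.List.insertBy (fun a b => decide (pri a < pri b) || (!decide (pri b < pri a) && decide (arr a < arr b))) i t, by simp [h1, h2], ?_⟩
            simp [pyLtInf, pyEqInf, h1, hne]
          · have heq : pri i = pri m := by omega
            by_cases h3 : arr i < arr m
            · right
              refine ⟨i, m :: t, by simp [h1, h2, h3], ?_⟩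
              simp [pyLtInf, pyEqInf, heq, h3]
            · right
              refine ⟨m, PySem.List.insertBy (fun a b => decide (pri a < pri b) || (!decide (pri b < pri a) && decide (arr a < arr b))) i t, by simp [h1, h2, h3], ?_⟩
              simp [pyLtInf, pyEqInf, heq, h3]
    · simp only [hp, if_neg, Bool.false_eq_true, not_false_iff]
      exact ih s st hrel

-- ===== VERDICT (by name: the statement is the Claim_ definition above) =====
theorem find_next_process_spec : Claim_equal_find_next_process := by
  intro processes n completed current_time _ _
  unfold Spec_find_next_process find_next_process find_next_process_alt
  have h := fold_inv
    (fun i => (PySem.List.pyGetD processes i (0, 0, 0, 0)).2.2.2)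
    (fun i => (PySem.List.pyGetD processes i (0, 0, 0, 0)).2.1)
    (fun i => (PySem.List.pyGetD processes i (0, 0, 0, 0)).2.2.1)
    (fun i => !(PySem.List.pyGetD completed i true) &&
              decide ((PySem.List.pyGetD processes i (0, 0, 0, 0)).2.1 ≤ current_time))
    (PySem.List.pyRange 0 n 1) [] (none, none, none, -1) (Or.inl ⟨rfl, rfl⟩)
  simp only [PySem.List.sorted2, Bool.false_eq_true, if_false] at *
  rcases h with ⟨hs, hst⟩ | ⟨m, t, hs, hst⟩ <;>
    simp only [hs, hst]
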